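-- pv_equiv track=rewrite | github.com/ccc114b/cccocw | _book/alg/_code/01/01-4-brute-force.py | brute_force_closest_string
-- ===== SOURCE A (Python) =====
-- from typing import List, Tuple, Any, Callable, Optional
--
-- def brute_force_closest_string(
--     candidates: List[str],
--     target: str
-- ) -> Tuple[str, int]:
--     """
--     暴力法找最接近的字串
--
--     參數:
--         candidates: 候選字串列表
--         target: 目標字串
--
--     返回:
--         (最接近的字串, 最小編輯距離)
--     """
--     def edit_distance(s1: str, s2: str) -> int:
--         m, n = len(s1), len(s2)
--         dp = [[0] * (n + 1) for _ in range(m + 1)]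
--
--         for i in range(m + 1):
--             dp[i][0] = i
--         for j in range(n + 1):
--             dp[0][j] = j
--
--         for i in range(1, m + 1):
--             for j in range(1, n + 1):
--                 if s1[i-1] == s2[j-1]:
--                     dp[i][j] = dp[i-1][j-1]
--                 else:
--                     dp[i][j] = 1 + min(dp[i-1][j], dp[i][j-1], dp[i-1][j-1])
--
--         return dp[m][n]
--
--     min_dist = float('inf')
--     closest = candidates[0]
--
--     for candidate in candidates:
--         dist = edit_distance(candidate, target)
--         if dist < min_dist:
--             min_dist = dist
--             closest = candidate
--
--     return closest, min_dist
-- ===== SOURCE B (Python) =====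
-- from typing import List, Tuple
--
-- def brute_force_closest_string(
--     candidates: List[str],
--     target: str
-- ) -> Tuple[str, int]:
--     def edit_distance(s1: str, s2: str) -> int:
--         # top-down recursion on index pairs, memoized in a dict local to this call
--         memo = {}
--         def rec(i: int, j: int) -> int:
--             if i == 0:
--                 return j
--             if j == 0:
--                 return i
--             v = memo.get((i, j))
--             if v is not None:
--                 return v
--             if s1[i-1] == s2[j-1]:
--                 v = rec(i-1, j-1)
--             else:
--                 v = 1 + min(rec(i-1, j), rec(i, j-1), rec(i-1, j-1))
--             memo[(i, j)] = v
--             return v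
--         return rec(len(s1), len(s2))
--
--     closest = min(candidates, key=lambda c: edit_distance(c, target))
--     return closest, edit_distance(closest, target)
-- ===== Notes on version B (the rewrite author's own statement) =====
-- stated objective: alternative
-- what changed: edit_distance is rewritten from A's bottom-up (m+1)x(n+1) table fill to a top-down recursive function on index pairs memoized in a per-call dict (base cases return the remaining length, matching chars recurse diagonally), and A's running-minimum scan with a float('inf') sentinel is replaced by min(candidates, key=edit_distance), which keeps the first minimum exactly like A's strict-< update.
-- outside the precondition, e.g. on brute_force_closest_string([], 'abc'): A raises IndexError, B raises ValueError
import Mathlib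
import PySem

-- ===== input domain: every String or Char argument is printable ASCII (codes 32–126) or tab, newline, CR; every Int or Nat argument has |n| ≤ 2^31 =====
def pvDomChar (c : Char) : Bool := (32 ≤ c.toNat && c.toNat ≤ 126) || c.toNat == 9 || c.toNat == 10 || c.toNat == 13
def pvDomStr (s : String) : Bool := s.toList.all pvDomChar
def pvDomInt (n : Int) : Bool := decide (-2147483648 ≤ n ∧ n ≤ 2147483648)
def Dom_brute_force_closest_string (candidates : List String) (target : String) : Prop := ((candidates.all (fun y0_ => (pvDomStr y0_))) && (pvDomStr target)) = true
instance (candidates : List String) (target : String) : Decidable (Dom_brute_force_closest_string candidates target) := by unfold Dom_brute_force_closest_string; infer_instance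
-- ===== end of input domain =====

-- B replaces A's bottom-up full-table DP by a top-down recursion memoized in a dict on
-- index pairs, and A's running-minimum scan by min(candidates, key=…) (objective: alternative).

-- ===== PORT A =====
-- dp[i][j] read / write on the list-of-lists table
def pvGet2 (dp : List (List Int)) (i j : Nat) : Int := (dp.getD i []).getD j 0
def pvSet2 (dp : List (List Int)) (i j : Nat) (v : Int) : List (List Int) :=
  dp.set i ((dp.getD i []).set j v)

-- A's edit_distance: full table; the loops over range(1, m+1) / range(1, n+1) are the
-- folds over List.range m / List.range n with i = i'+1, j = j'+1.
def aEdit (s1 s2 : List Char) : Int :=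
  let m := s1.length
  let n := s2.length
  let dp0 := List.replicate (m+1) (List.replicate (n+1) (0:Int))
  let dp1 := (List.range (m+1)).foldl (fun dp i => pvSet2 dp i 0 (i:Int)) dp0
  let dp2 := (List.range (n+1)).foldl (fun dp j => pvSet2 dp 0 j (j:Int)) dp1
  let dp3 := (List.range m).foldl (fun dp i' =>
      (List.range n).foldl (fun dp j' =>
        let v := if s1.getD i' ' ' = s2.getD j' ' '
                 then pvGet2 dp i' j'
                 else 1 + min (pvGet2 dp i' (j'+1)) (min (pvGet2 dp (i'+1) j') (pvGet2 dp i' j'))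
        pvSet2 dp (i'+1) (j'+1) v) dp) dp2
  pvGet2 dp3 m n

-- A's outer loop: min_dist = float('inf') is the `none` state (any dist < inf);
-- candidates[0] on [] would raise IndexError — excluded by Pre_.
def brute_force_closest_string (candidates : List String) (target : String) : String × Int :=
  let closest0 := candidates.headD ""
  let r := candidates.foldl (fun acc c =>
      let d := aEdit c.toList target.toList
      match acc.2 with
      | none => (c, some d)
      | some md => if d < md then (c, some d) else acc)
    (closest0, (none : Option Int))
  (r.1, r.2.getD 0)

-- ===== PORT B =====
-- B's rec(i, j): top-down recursion memoized in the dict `memo` (threaded through, since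
-- Python mutates it in place); base cases first, then the memo lookup, then the recurrence.
def bRec (s1 s2 : List Char) : Nat → Nat → PySem.Dict (Nat × Nat) Int → Int × PySem.Dict (Nat × Nat) Int
  | 0, j, memo => ((j : Int), memo)
  | i+1, 0, memo => ((i : Int) + 1, memo)
  | i+1, j+1, memo =>
    match memo.get? (i+1, j+1) with
    | some v => (v, memo)
    | none =>
      if s1.getD i ' ' = s2.getD j ' ' then
        let r := bRec s1 s2 i j memo
        (r.1, r.2.insert (i+1, j+1) r.1)
      else
        let r1 := bRec s1 s2 i (j+1) memo        -- rec(i-1, j)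
        let r2 := bRec s1 s2 (i+1) j r1.2        -- rec(i, j-1)
        let r3 := bRec s1 s2 i j r2.2            -- rec(i-1, j-1)
        let v := 1 + min r1.1 (min r2.1 r3.1)
        (v, r3.2.insert (i+1, j+1) v)
termination_by i j _ => i + j

-- B's edit_distance: fresh memo, then rec(len(s1), len(s2))
def bEdit (s1 s2 : List Char) : Int :=
  (bRec s1 s2 s1.length s2.length PySem.Dict.empty).1

-- min(candidates, key=…) = PySem.List.min? (first minimum); none only on [] (excluded by Pre_)
def brute_force_closest_string_alt (candidates : List String) (target : String) : String × Int :=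
  match PySem.List.min? candidates (fun c => bEdit c.toList target.toList) with
  | some closest => (closest, bEdit closest.toList target.toList)
  | none => ("", 0)

-- ===== PRECONDITION & SPEC =====
-- Pre_ excludes only the empty candidate list, on which A raises IndexError (candidates[0]).
def Pre_brute_force_closest_string (candidates : List String) (target : String) : Prop :=
  candidates ≠ []
instance (candidates : List String) (target : String) : Decidable (Pre_brute_force_closest_string candidates target) := by
  unfold Pre_brute_force_closest_string; infer_instance

def pvWitness_brute_force_closest_string : List String × String := (["kitten", "cat", "site"], "sitting")

def Spec_brute_force_closest_string (candidates : List String) (target : String) (out : String × Int) : Prop := out = brute_force_closest_string_alt candidates target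
instance (candidates : List String) (target : String) (out : String × Int) : Decidable (Spec_brute_force_closest_string candidates target out) := by unfold Spec_brute_force_closest_string; infer_instance

-- ===== CLAIM (what is proved, stated in full; the proofs are below) =====
def Claim_equal_brute_force_closest_string : Prop := ∀ (candidates : List String) (target : String), Dom_brute_force_closest_string candidates target → Pre_brute_force_closest_string candidates target → Spec_brute_force_closest_string candidates target (brute_force_closest_string candidates target)

-- ===== LEMMAS AND PROOFS =====

-- the Levenshtein recurrence both programs implement (reference for the proof only)
def levE (s1 s2 : List Char) : Nat → Nat → Int
  | 0, j => (j : Int)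
  | i+1, 0 => (i : Int) + 1
  | i+1, j+1 =>
      if s1.getD i ' ' = s2.getD j ' ' then levE s1 s2 i j
      else 1 + min (levE s1 s2 i (j+1)) (min (levE s1 s2 (i+1) j) (levE s1 s2 i j))
termination_by i j => i + j

-- finished row r of the table / rolling row after r outer steps
def rowE (s1 s2 : List Char) (r : Nat) : List Int :=
  (List.range (s2.length+1)).map (fun j => levE s1 s2 r j)
-- row r as initialised by A (r at column 0, zeros elsewhere)
def rowI (n r : Nat) : List Int := (r:Int) :: List.replicate n 0
-- table state after the first i rows are finished
def rowH (s1 s2 : List Char) (i r : Nat) : List Int :=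
  if r ≤ i then rowE s1 s2 r else rowI s2.length r

lemma set_map_range {α : Type} (f : Nat → α) (N i : Nat) (v : α) (h : i < N) :
    ((List.range N).map f).set i v = (List.range N).map (fun r => if r = i then v else f r) := by
  apply List.ext_getElem (by simp)
  intro k h1 h2
  simp only [List.getElem_set, List.getElem_map, List.getElem_range]
  by_cases hk : i = k
  · simp [hk]
  · simp only [if_neg hk, if_neg (fun h : k = i => hk h.symm)]

lemma pvGet2_map (g : Nat → List Int) (M r j : Nat) (h : r < M) :
    pvGet2 ((List.range M).map g) r j = (g r).getD j 0 := by
  unfold pvGet2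
  rw [PySem.List.getD_map_range _ _ _ _ h]

lemma pvSet2_map (g : Nat → List Int) (M r j : Nat) (v : Int) (h : r < M) :
    pvSet2 ((List.range M).map g) r j v
      = (List.range M).map (fun t => if t = r then (g r).set j v else g t) := by
  unfold pvSet2
  rw [PySem.List.getD_map_range _ _ _ _ h, set_map_range _ _ _ _ h]

lemma dp1_eq (m n : Nat) : ∀ k, k ≤ m+1 →
    (List.range k).foldl (fun dp i => pvSet2 dp i 0 (i:Int))
      (List.replicate (m+1) (List.replicate (n+1) (0:Int)))
    = (List.range (m+1)).map (fun r => if r < k then rowI n r else List.replicate (n+1) 0) := by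
  intro k
  induction k with
  | zero =>
    intro _
    simp [List.map_const']
  | succ k ih =>
    intro hk
    rw [show List.range (k+1) = List.range k ++ [k] from List.range_succ,
        List.foldl_append, ih (by omega)]
    simp only [List.foldl_cons, List.foldl_nil]
    rw [pvSet2_map _ _ _ _ _ (by omega)]
    apply List.map_congr_left
    intro t ht
    simp only [List.mem_range] at ht
    by_cases h1 : t = k
    · subst h1
      simp [rowI, List.replicate_succ]
    · by_cases h2 : t < k <;> simp [h1, h2] <;> omega

lemma dp2_eq (m n : Nat) : ∀ k, k ≤ n+1 →
    (List.range k).foldl (fun dp j => pvSet2 dp 0 j (j:Int))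
      ((List.range (m+1)).map (fun r => rowI n r))
    = (List.range (m+1)).map (fun r => if r = 0 then ((List.range k).map (fun j => Int.ofNat j) ++ List.replicate (n+1-k) 0) else rowI n r) := by
  intro k
  induction k with
  | zero =>
    intro _
    apply List.map_congr_left
    intro t ht
    by_cases h1 : t = 0 <;> simp [h1, rowI, List.replicate_succ]
  | succ k ih =>
    intro hk
    rw [show List.range (k+1) = List.range k ++ [k] from List.range_succ,
        List.foldl_append, ih (by omega)]
    simp only [List.foldl_cons, List.foldl_nil]
    rw [pvSet2_map _ _ _ _ _ (by omega)]
    apply List.map_congr_left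
    intro t ht
    simp only [List.mem_range] at ht
    by_cases h1 : t = 0
    · subst h1
      simp only [eq_self_iff_true, if_true]
      have hlen : ((List.range k).map (fun j => Int.ofNat j)).length = k := by simp
      rw [List.set_append_right _ _ (by omega)]
      have hrep : List.replicate (n+1-k) (0:Int) = 0 :: List.replicate (n-k) 0 := by
        have : n+1-k = (n-k)+1 := by omega
        rw [this, List.replicate_succ]
      rw [hlen, hrep]
      simp only [Nat.sub_self, List.set_cons_zero]
      have h2 : n+1-(k+1) = n-k := by omega
      simp [h2, List.map_append]
    · simp [h1]

lemma innerA_eq (s1 s2 : List Char) (i' : Nat) (hi : i' < s1.length) : ∀ k, k ≤ s2.length →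
    (List.range k).foldl (fun dp j' =>
        let v := if s1.getD i' ' ' = s2.getD j' ' '
                 then pvGet2 dp i' j'
                 else 1 + min (pvGet2 dp i' (j'+1)) (min (pvGet2 dp (i'+1) j') (pvGet2 dp i' j'))
        pvSet2 dp (i'+1) (j'+1) v)
      ((List.range (s1.length+1)).map (fun r => rowH s1 s2 i' r))
    = (List.range (s1.length+1)).map (fun r =>
        if r = i'+1 then ((List.range (k+1)).map (fun j => levE s1 s2 (i'+1) j) ++ List.replicate (s2.length-k) 0)
        else rowH s1 s2 i' r) := by
  intro k
  induction k with
  | zero =>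
    intro _
    apply List.map_congr_left
    intro t ht
    by_cases h1 : t = i'+1
    · subst h1
      rw [if_pos rfl]
      simp [rowH, rowI, levE, List.range_one]
    · simp [h1]
  | succ k ih =>
    intro hk
    rw [show List.range (k+1) = List.range k ++ [k] from List.range_succ,
        List.foldl_append, ih (by omega)]
    simp only [List.foldl_cons, List.foldl_nil]
    have hm' : i' < s1.length + 1 := by omega
    have hI : i' + 1 < s1.length + 1 := by omega
    have hG1 : ¬ (i' = i' + 1) := by omega
    have hrowE : ∀ j, j < s2.length + 1 → (rowH s1 s2 i' i').getD j 0 = levE s1 s2 i' j := by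
      intro j hj
      simp only [rowH, if_pos (le_refl i'), rowE]
      rw [PySem.List.getD_map_range _ _ _ _ hj]
    have e1 : pvGet2 ((List.range (s1.length+1)).map (fun r =>
        if r = i'+1 then ((List.range (k+1)).map (fun j => levE s1 s2 (i'+1) j) ++ List.replicate (s2.length-k) 0)
        else rowH s1 s2 i' r)) i' k = levE s1 s2 i' k := by
      rw [pvGet2_map _ _ _ _ hm', if_neg hG1]
      exact hrowE k (by omega)
    have e2 : pvGet2 ((List.range (s1.length+1)).map (fun r =>
        if r = i'+1 then ((List.range (k+1)).map (fun j => levE s1 s2 (i'+1) j) ++ List.replicate (s2.length-k) 0)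
        else rowH s1 s2 i' r)) i' (k+1) = levE s1 s2 i' (k+1) := by
      rw [pvGet2_map _ _ _ _ hm', if_neg hG1]
      exact hrowE (k+1) (by omega)
    have e3 : pvGet2 ((List.range (s1.length+1)).map (fun r =>
        if r = i'+1 then ((List.range (k+1)).map (fun j => levE s1 s2 (i'+1) j) ++ List.replicate (s2.length-k) 0)
        else rowH s1 s2 i' r)) (i'+1) k = levE s1 s2 (i'+1) k := by
      rw [pvGet2_map _ _ _ _ hI, if_pos rfl]
      have hlen : ((List.range (k+1)).map (fun j => levE s1 s2 (i'+1) j)).length = k+1 := by simp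
      rw [List.getD_append _ _ _ _ (by omega)]
      rw [PySem.List.getD_map_range _ _ _ _ (by omega)]
    simp only [e1, e2, e3]
    rw [pvSet2_map _ _ _ _ _ hI, if_pos rfl]
    have hv : (if s1.getD i' ' ' = s2.getD k ' ' then levE s1 s2 i' k
        else 1 + min (levE s1 s2 i' (k+1)) (min (levE s1 s2 (i'+1) k) (levE s1 s2 i' k)))
        = levE s1 s2 (i'+1) (k+1) := by
      rw [levE]
    rw [hv]
    have hlen : ((List.range (k+1)).map (fun j => levE s1 s2 (i'+1) j)).length = k+1 := by simp
    rw [List.set_append_right _ _ (by omega)]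
    have hrep : List.replicate (s2.length-k) (0:Int) = 0 :: List.replicate (s2.length-(k+1)) 0 := by
      have : s2.length-k = (s2.length-(k+1))+1 := by omega
      rw [this, List.replicate_succ]
    rw [hlen, hrep]
    simp only [Nat.sub_self, List.set_cons_zero]
    apply List.map_congr_left
    intro t ht
    by_cases h1 : t = i'+1
    · subst h1
      simp only [if_pos rfl]
      rw [show List.range (k+1+1) = List.range (k+1) ++ [k+1] from List.range_succ, List.map_append]
      simp
    · simp [h1]

lemma outerA_eq (s1 s2 : List Char) : ∀ i, i ≤ s1.length →
    (List.range i).foldl (fun dp i' =>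
      (List.range s2.length).foldl (fun dp j' =>
        let v := if s1.getD i' ' ' = s2.getD j' ' '
                 then pvGet2 dp i' j'
                 else 1 + min (pvGet2 dp i' (j'+1)) (min (pvGet2 dp (i'+1) j') (pvGet2 dp i' j'))
        pvSet2 dp (i'+1) (j'+1) v) dp)
      ((List.range (s1.length+1)).map (fun r => rowH s1 s2 0 r))
    = (List.range (s1.length+1)).map (fun r => rowH s1 s2 i r) := by
  intro i
  induction i with
  | zero => intro _; simp
  | succ i ih =>
    intro hi
    rw [show List.range (i+1) = List.range i ++ [i] from List.range_succ,
        List.foldl_append, ih (by omega)]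
    simp only [List.foldl_cons, List.foldl_nil]
    rw [innerA_eq s1 s2 i (by omega) s2.length (le_refl _)]
    apply List.map_congr_left
    intro t ht
    simp only [List.mem_range] at ht
    by_cases h1 : t = i+1
    · subst h1
      rw [if_pos rfl]
      simp [rowH, rowE]
    · rw [if_neg h1]
      unfold rowH
      by_cases h2 : t ≤ i
      · rw [if_pos h2, if_pos (by omega)]
      · rw [if_neg h2, if_neg (by omega)]

lemma aEdit_eq (s1 s2 : List Char) : aEdit s1 s2 = levE s1 s2 s1.length s2.length := by
  unfold aEdit
  simp only []
  rw [dp1_eq s1.length s2.length (s1.length+1) (le_refl _)]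
  have h1 : (List.range (s1.length+1)).map (fun r => if r < s1.length+1 then rowI s2.length r else List.replicate (s2.length+1) 0)
      = (List.range (s1.length+1)).map (fun r => rowI s2.length r) := by
    apply List.map_congr_left
    intro t ht
    simp only [List.mem_range] at ht
    rw [if_pos ht]
  rw [h1, dp2_eq s1.length s2.length (s2.length+1) (le_refl _)]
  have h2 : (List.range (s1.length+1)).map (fun r => if r = 0 then ((List.range (s2.length+1)).map (fun j => Int.ofNat j) ++ List.replicate (s2.length+1-(s2.length+1)) 0) else rowI s2.length r)
      = (List.range (s1.length+1)).map (fun r => rowH s1 s2 0 r) := by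
    apply List.map_congr_left
    intro t ht
    by_cases h3 : t = 0
    · subst h3
      rw [if_pos rfl, Nat.sub_self, List.replicate_zero, List.append_nil]
      unfold rowH
      rw [if_pos (le_refl 0)]
      unfold rowE
      apply List.map_congr_left
      intro j hj
      simp [levE]
    · rw [if_neg h3]
      unfold rowH
      rw [if_neg (by omega)]
  rw [h2, outerA_eq s1 s2 s1.length (le_refl _), pvGet2_map _ _ _ _ (by omega)]
  unfold rowH
  rw [if_pos (le_refl _)]
  unfold rowE
  rw [PySem.List.getD_map_range _ _ _ _ (by omega)]

-- B side: the memo invariant — every stored value is the Levenshtein value of its key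
def InvB (s1 s2 : List Char) (memo : PySem.Dict (Nat × Nat) Int) : Prop :=
  ∀ p v, memo.get? p = some v → v = levE s1 s2 p.1 p.2

lemma bRec_spec (s1 s2 : List Char) : ∀ N i j memo, i + j ≤ N → InvB s1 s2 memo →
    (bRec s1 s2 i j memo).1 = levE s1 s2 i j ∧ InvB s1 s2 (bRec s1 s2 i j memo).2 := by
  intro N
  induction N with
  | zero =>
    intro i j memo hN hInv
    have hi : i = 0 := by omega
    subst hi
    exact ⟨by simp [bRec, levE], by simpa [bRec] using hInv⟩
  | succ N ih =>
    intro i j memo hN hInv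
    match i, j with
    | 0, j => exact ⟨by simp [bRec, levE], by simpa [bRec] using hInv⟩
    | i+1, 0 => exact ⟨by simp [bRec, levE], by simpa [bRec] using hInv⟩
    | i+1, j+1 =>
      rw [bRec]
      cases hmem : memo.get? (i+1, j+1) with
      | some v =>
        exact ⟨hInv _ _ hmem, hInv⟩
      | none =>
        simp only
        by_cases hc : s1.getD i ' ' = s2.getD j ' '
        · rw [if_pos hc]
          obtain ⟨h1, h2⟩ := ih i j memo (by omega) hInv
          constructor
          · rw [h1, levE, if_pos hc]
          · intro p w hp
            rw [PySem.Dict.get?_insert] at hp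
            by_cases hpk : p = (i+1, j+1)
            · rw [if_pos hpk] at hp
              cases hp
              subst hpk
              rw [h1]
              show levE s1 s2 i j = levE s1 s2 (i+1) (j+1)
              rw [levE, if_pos hc]
            · rw [if_neg hpk] at hp
              exact h2 p w hp
        · rw [if_neg hc]
          obtain ⟨ha1, ha2⟩ := ih i (j+1) memo (by omega) hInv
          obtain ⟨hb1, hb2⟩ := ih (i+1) j _ (by omega) ha2
          obtain ⟨hc1, hc2⟩ := ih i j _ (by omega) hb2
          constructor
          · rw [ha1, hb1, hc1, levE, if_neg hc]
          · intro p w hp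
            rw [PySem.Dict.get?_insert] at hp
            by_cases hpk : p = (i+1, j+1)
            · rw [if_pos hpk] at hp
              cases hp
              subst hpk
              rw [ha1, hb1, hc1]
              show _ = levE s1 s2 (i+1) (j+1)
              rw [levE, if_neg hc]
            · rw [if_neg hpk] at hp
              exact hc2 p w hp

lemma bEdit_eq (s1 s2 : List Char) : bEdit s1 s2 = levE s1 s2 s1.length s2.length := by
  unfold bEdit
  exact (bRec_spec s1 s2 (s1.length + s2.length) s1.length s2.length PySem.Dict.empty
    (le_refl _) (by intro p v h; simp [PySem.Dict.get?_empty] at h)).1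

lemma edit_eq (s1 s2 : List Char) : aEdit s1 s2 = bEdit s1 s2 := by
  rw [aEdit_eq, bEdit_eq]

-- outer-loop correspondence
def gmin (f : String → Int) : List String → String → String
  | [], cl => cl
  | x :: xs, cl => gmin f xs (if f x < f cl then x else cl)

lemma foldA_eq (target : String) : ∀ (xs : List String) (cl : String),
    xs.foldl (fun acc c =>
      let d := aEdit c.toList target.toList
      match acc.2 with
      | none => (c, some d)
      | some md => if d < md then (c, some d) else acc)
      (cl, some (aEdit cl.toList target.toList))
    = (gmin (fun c => aEdit c.toList target.toList) xs cl,
       some (aEdit (gmin (fun c => aEdit c.toList target.toList) xs cl).toList target.toList)) := by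
  intro xs
  induction xs with
  | nil => intro cl; simp [gmin]
  | cons x xs ih =>
    intro cl
    simp only [List.foldl_cons, gmin]
    by_cases h : aEdit x.toList target.toList < aEdit cl.toList target.toList
    · simp only [h, if_pos]
      exact ih x
    · simp only [h, if_neg, if_false]
      exact ih cl

lemma min?_eq_gmin (key : String → Int) : ∀ (rest : List String) (c : String),
    PySem.List.min? (c :: rest) key = some (gmin key rest c) := by
  intro rest
  induction rest with
  | nil => intro c; rfl
  | cons x xs ih =>
    intro c
    have h1 : PySem.List.min? (c :: x :: xs) key
        = PySem.List.min? ((if key x < key c then x else c) :: xs) key := by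
      unfold PySem.List.min?
      simp only [List.foldl_cons]
      congr 1
      by_cases h : key x < key c <;> simp [h]
    rw [h1, ih]
    simp only [gmin]

-- ===== VERDICT (by name: the statement is the Claim_ definition above) =====
theorem brute_force_closest_string_spec : Claim_equal_brute_force_closest_string := by
  intro candidates target hdom hpre
  unfold Pre_brute_force_closest_string at hpre
  unfold Spec_brute_force_closest_string
  obtain ⟨c, rest, rfl⟩ := List.exists_cons_of_ne_nil hpre
  have hf : (fun c : String => aEdit c.toList target.toList) = (fun c : String => bEdit c.toList target.toList) :=
    funext fun x => edit_eq _ _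
  unfold brute_force_closest_string
  simp only [List.headD_cons, List.foldl_cons]
  rw [foldA_eq target rest c]
  unfold brute_force_closest_string_alt
  rw [min?_eq_gmin (fun c : String => bEdit c.toList target.toList) rest c]
  simp only [Option.getD_some]
  have hg : gmin (fun c : String => aEdit c.toList target.toList) rest c
      = gmin (fun c : String => bEdit c.toList target.toList) rest c := by rw [hf]
  rw [hg, edit_eq]
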